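-- pv_equiv track=rewrite | github.com/DrumJB/AdventOfCode2024 | 07/day07.py | rec_oper
-- ===== SOURCE A (Python) =====
-- def rec_oper(nums):
--     if len(nums) == 1:
--         return [nums[0]]
--     else:
--         results = []
--         for n in rec_oper(nums[:-1]):
--             results.append(n*nums[-1:][0])
--             results.append(n+nums[-1:][0])
--     return results
-- ===== SOURCE B (Python) =====
-- def rec_oper(nums):
--     results = [nums[0]]
--     for x in nums[1:]:
--         results = [v for n in results for v in (n * x, n + x)]
--     return results
-- ===== Notes on version B (the rewrite author's own statement) =====
-- stated objective: simpler
-- what changed: Replaced right-end recursion (peeling nums[:-1]) with a single iterative left-to-right fold that rebuilds the results list for each successive number, preserving the multiply-then-add order.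
import Mathlib
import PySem

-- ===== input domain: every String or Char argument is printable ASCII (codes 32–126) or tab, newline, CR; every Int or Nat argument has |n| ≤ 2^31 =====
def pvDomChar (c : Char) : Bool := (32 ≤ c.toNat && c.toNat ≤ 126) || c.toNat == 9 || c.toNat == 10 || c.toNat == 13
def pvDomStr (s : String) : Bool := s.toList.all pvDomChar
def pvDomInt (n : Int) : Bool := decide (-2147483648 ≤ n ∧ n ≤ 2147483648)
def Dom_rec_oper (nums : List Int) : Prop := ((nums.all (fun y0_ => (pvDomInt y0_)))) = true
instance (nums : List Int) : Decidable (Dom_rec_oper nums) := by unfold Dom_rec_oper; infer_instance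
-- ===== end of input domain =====

-- B replaces A's right-end recursion by a single left-to-right fold (same values, same order).

-- ===== PORT A =====
-- A recurses on nums[:-1] and expands each partial result with the last element.
-- The [] branch is only a totality guard: Pre_ excludes [], where Python A never returns.
def rec_oper (nums : List Int) : List Int :=
  match nums with
  | [] => []
  | [x] => [x]
  | x :: y :: t =>
    let last := (x :: y :: t).getLast!
    (rec_oper (x :: y :: t).dropLast).foldl (fun results n => results ++ [n * last, n + last]) []
termination_by nums.length
decreasing_by simp

-- ===== PORT B =====
-- Source B: results = [nums[0]]; for x in nums[1:]: rebuild results with n*x then n+x.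
-- The [] branch is a totality guard: Python B raises IndexError at nums[0] there (outside Pre_).
def rec_oper_alt (nums : List Int) : List Int :=
  match nums with
  | [] => []
  | x :: rest =>
    rest.foldl (fun results y => results.foldl (fun acc n => acc ++ [n * y, n + y]) []) [x]

-- ===== PRECONDITION & SPEC =====
-- Pre_ excludes only the empty list, on which Python A recurses forever (RecursionError)
-- and Python B raises IndexError: neither program returns there.
def Pre_rec_oper (nums : List Int) : Prop := nums ≠ []
instance (nums : List Int) : Decidable (Pre_rec_oper nums) := by unfold Pre_rec_oper; infer_instance
def pvWitness_rec_oper : List Int := ([3, 5, 2])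
def Spec_rec_oper (nums : List Int) (out : List Int) : Prop := out = rec_oper_alt nums
instance (nums : List Int) (out : List Int) : Decidable (Spec_rec_oper nums out) := by unfold Spec_rec_oper; infer_instance

-- ===== CLAIM (what is proved, stated in full; the proofs are below) =====
def Claim_equal_rec_oper : Prop := ∀ (nums : List Int), Dom_rec_oper nums → Pre_rec_oper nums → Spec_rec_oper nums (rec_oper nums)

-- ===== LEMMAS AND PROOFS =====

def pvStep (results : List Int) (y : Int) : List Int :=
  results.foldl (fun acc n => acc ++ [n * y, n + y]) []

lemma rec_oper_alt_snoc (x : Int) (rest : List Int) (y : Int) :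
    rec_oper_alt (x :: (rest ++ [y])) = pvStep (rec_oper_alt (x :: rest)) y := by
  simp [rec_oper_alt, pvStep, List.foldl_append]

lemma rec_oper_append (x : Int) (rest : List Int) (y : Int) :
    rec_oper (x :: rest ++ [y]) = pvStep (rec_oper (x :: rest)) y := by
  rcases rest with _ | ⟨a, t⟩
  · simp [rec_oper, pvStep]
  · show rec_oper (x :: a :: (t ++ [y])) = _
    rw [rec_oper]
    have he : x :: a :: (t ++ [y]) = (x :: a :: t) ++ [y] := by simp
    have h1 : (x :: a :: (t ++ [y])).getLast! = y := by
      rw [he]; simp [List.getLast!]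
    have h2 : (x :: a :: (t ++ [y])).dropLast = x :: a :: t := by
      rw [he, List.dropLast_concat]
    rw [h1, h2]
    rfl

lemma rec_oper_eq_alt (nums : List Int) (h : nums ≠ []) :
    rec_oper nums = rec_oper_alt nums := by
  induction nums using List.reverseRecOn with
  | nil => exact absurd rfl h
  | append_singleton l y ih =>
    rcases l with _ | ⟨x, rest⟩
    · simp [rec_oper, rec_oper_alt]
    · rw [rec_oper_append x rest y, ih (by simp), List.cons_append, rec_oper_alt_snoc]

-- ===== VERDICT (by name: the statement is the Claim_ definition above) =====
theorem rec_oper_spec : Claim_equal_rec_oper := by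
  intro nums _ hpre
  exact rec_oper_eq_alt nums hpre
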